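-- pv_equiv track=rewrite | github.com/shindozk/Luyumi-Launcher | lib/backend/src/services/ButlerService.py | _generate_download_urls
-- ===== SOURCE A (Python) =====
-- def _generate_download_urls(os_name, arch):
--     urls = []
--     mirrors = [
--         'https://broth.itch.zone/butler',
--         'https://dl.itch.ovh/butler',
--         'https://storage.googleapis.com/broth/butler'
--     ]
--
--     path_suffix = ''
--     if os_name == 'windows':
--         path_suffix = 'windows-amd64/LATEST/archive/default'
--     elif os_name == 'darwin':
--         if arch == 'arm64':
--             # For Apple Silicon, try arm64 first, then amd64
--             path_suffix = 'darwin-arm64/LATEST/archive/default'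
--         else:
--             path_suffix = 'darwin-amd64/LATEST/archive/default'
--     elif os_name == 'linux':
--         if arch == 'arm64':
--              path_suffix = 'linux-arm64/LATEST/archive/default'
--         else:
--              path_suffix = 'linux-amd64/LATEST/archive/default'
--     else:
--         raise Exception('Operating system not supported')
--
--     # Generate URLs
--     if os_name == 'darwin' and arch == 'arm64':
--          # Special case for Mac ARM64: add arm64 mirrors then amd64 mirrors
--          for mirror in mirrors:
--              urls.append(f"{mirror}/darwin-arm64/LATEST/archive/default")
--          for mirror in mirrors:
--              urls.append(f"{mirror}/darwin-amd64/LATEST/archive/default")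
--     elif os_name == 'linux' and arch == 'arm64':
--          # Linux ARM64: try arm64 first, then amd64 (fallback, though unlikely to run)
--          for mirror in mirrors:
--              urls.append(f"{mirror}/linux-arm64/LATEST/archive/default")
--          for mirror in mirrors:
--              urls.append(f"{mirror}/linux-amd64/LATEST/archive/default")
--     else:
--          for mirror in mirrors:
--              urls.append(f"{mirror}/{path_suffix}")
--
--     return urls
-- ===== SOURCE B (Python) =====
-- _M = ['https://broth.itch.zone/butler',
--       'https://dl.itch.ovh/butler',
--       'https://storage.googleapis.com/broth/butler']
--
-- # Precomputed answer table: every supported (os, arch) key maps straight to its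
-- # complete, final URL list; the function itself does no URL construction at all.
-- _URL_TABLE = {
--     'windows': [m + '/windows-amd64/LATEST/archive/default' for m in _M],
--     'darwin': [m + '/darwin-amd64/LATEST/archive/default' for m in _M],
--     'darwin-arm64': [m + '/darwin-arm64/LATEST/archive/default' for m in _M]
--                     + [m + '/darwin-amd64/LATEST/archive/default' for m in _M],
--     'linux': [m + '/linux-amd64/LATEST/archive/default' for m in _M],
--     'linux-arm64': [m + '/linux-arm64/LATEST/archive/default' for m in _M]
--                    + [m + '/linux-amd64/LATEST/archive/default' for m in _M],
-- }
--
-- def _generate_download_urls(os_name, arch):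
--     key = os_name + '-arm64' if arch == 'arm64' and os_name != 'windows' else os_name
--     try:
--         return list(_URL_TABLE[key])
--     except KeyError:
--         raise Exception('Operating system not supported')
-- ===== Notes on version B (the rewrite author's own statement) =====
-- stated objective: alternative
-- what changed: Replaces A's branch-selected suffix plus mirror-enumeration loops with a precomputed answer table: the function derives a single key from (os_name, arch) and returns the complete URL list by dictionary lookup, constructing no URLs at call time.
import Mathlib
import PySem

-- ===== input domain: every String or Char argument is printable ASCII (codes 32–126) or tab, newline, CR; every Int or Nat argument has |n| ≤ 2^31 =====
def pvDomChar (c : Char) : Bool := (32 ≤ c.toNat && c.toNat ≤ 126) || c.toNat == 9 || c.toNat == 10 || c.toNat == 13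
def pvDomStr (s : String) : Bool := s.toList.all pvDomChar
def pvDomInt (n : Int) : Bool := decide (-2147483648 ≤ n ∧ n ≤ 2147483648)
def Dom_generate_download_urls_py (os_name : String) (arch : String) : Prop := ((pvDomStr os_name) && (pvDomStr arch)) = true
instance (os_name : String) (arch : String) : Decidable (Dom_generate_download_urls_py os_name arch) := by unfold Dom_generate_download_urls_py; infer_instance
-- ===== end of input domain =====

-- B replaces A's branch-selected suffix and mirror loops with a precomputed
-- answer table looked up by one key derived from (os_name, arch); return value only.

-- ===== PORT A =====
-- Literal transliteration of A: the mutable path_suffix, the if/elif chain, then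
-- the three-way branch appending into urls via foldl. The 'raise' branch is
-- outside Pre_ and returns [] here.
def generate_download_urls_py (os_name : String) (arch : String) : List String :=
  let mirrors : List String :=
    ["https://broth.itch.zone/butler",
     "https://dl.itch.ovh/butler",
     "https://storage.googleapis.com/broth/butler"]
  let path_suffix : String := ""
  let path_suffix : String :=
    if os_name == "windows" then "windows-amd64/LATEST/archive/default"
    else if os_name == "darwin" then
      (if arch == "arm64" then "darwin-arm64/LATEST/archive/default"
       else "darwin-amd64/LATEST/archive/default")
    else if os_name == "linux" then
      (if arch == "arm64" then "linux-arm64/LATEST/archive/default"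
       else "linux-amd64/LATEST/archive/default")
    else path_suffix  -- Python raises here; excluded by Pre_
  if os_name == "darwin" && arch == "arm64" then
    let urls := mirrors.foldl (fun urls mirror => urls ++ [mirror ++ "/darwin-arm64/LATEST/archive/default"]) []
    mirrors.foldl (fun urls mirror => urls ++ [mirror ++ "/darwin-amd64/LATEST/archive/default"]) urls
  else if os_name == "linux" && arch == "arm64" then
    let urls := mirrors.foldl (fun urls mirror => urls ++ [mirror ++ "/linux-arm64/LATEST/archive/default"]) []
    mirrors.foldl (fun urls mirror => urls ++ [mirror ++ "/linux-amd64/LATEST/archive/default"]) urls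
  else
    mirrors.foldl (fun urls mirror => urls ++ [mirror ++ "/" ++ path_suffix]) []

-- ===== PORT B =====
-- Source B's module-level mirrors and precomputed answer table (_URL_TABLE).
def pvMirrorsB : List String :=
  ["https://broth.itch.zone/butler",
   "https://dl.itch.ovh/butler",
   "https://storage.googleapis.com/broth/butler"]

def pvUrlTable : PySem.Dict String (List String) :=
  PySem.Dict.ofList
    [("windows", pvMirrorsB.map (fun m => m ++ "/windows-amd64/LATEST/archive/default")),
     ("darwin", pvMirrorsB.map (fun m => m ++ "/darwin-amd64/LATEST/archive/default")),
     ("darwin-arm64", pvMirrorsB.map (fun m => m ++ "/darwin-arm64/LATEST/archive/default")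
                      ++ pvMirrorsB.map (fun m => m ++ "/darwin-amd64/LATEST/archive/default")),
     ("linux", pvMirrorsB.map (fun m => m ++ "/linux-amd64/LATEST/archive/default")),
     ("linux-arm64", pvMirrorsB.map (fun m => m ++ "/linux-arm64/LATEST/archive/default")
                     ++ pvMirrorsB.map (fun m => m ++ "/linux-amd64/LATEST/archive/default"))]

def generate_download_urls_py_alt (os_name : String) (arch : String) : List String :=
  let key := if arch == "arm64" && os_name != "windows" then os_name ++ "-arm64" else os_name
  match pvUrlTable.get? key with
  | some l => l
  | none => []  -- Python raises Exception('Operating system not supported') here; outside Pre_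

-- ===== PRECONDITION & SPEC =====
-- Pre_ excludes exactly the os_name values on which A raises Exception('Operating system not supported').
def Pre_generate_download_urls_py (os_name : String) (arch : String) : Prop :=
  os_name = "windows" ∨ os_name = "darwin" ∨ os_name = "linux"
instance (os_name : String) (arch : String) : Decidable (Pre_generate_download_urls_py os_name arch) := by unfold Pre_generate_download_urls_py; infer_instance
def pvWitness_generate_download_urls_py : String × String := ("darwin", "arm64")

def Spec_generate_download_urls_py (os_name : String) (arch : String) (out : List String) : Prop := out = generate_download_urls_py_alt os_name arch
instance (os_name : String) (arch : String) (out : List String) : Decidable (Spec_generate_download_urls_py os_name arch out) := by unfold Spec_generate_download_urls_py; infer_instance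

-- ===== CLAIM =====
def Claim_equal_generate_download_urls_py : Prop := ∀ (os_name : String) (arch : String), Dom_generate_download_urls_py os_name arch → Pre_generate_download_urls_py os_name arch → Spec_generate_download_urls_py os_name arch (generate_download_urls_py os_name arch)

-- ===== LEMMAS AND PROOFS =====

-- ===== VERDICT =====
theorem generate_download_urls_py_spec : Claim_equal_generate_download_urls_py := by
  intro os_name arch _ hpre
  unfold Spec_generate_download_urls_py
  rcases hpre with h | h | h <;> subst h <;>
    by_cases ha : arch = "arm64" <;>
      simp [generate_download_urls_py, generate_download_urls_py_alt, ha,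
            pvUrlTable, pvMirrorsB, PySem.Dict.ofList, PySem.Dict.update,
            PySem.Dict.get?, PySem.Dict.empty, PySem.Dict.insert]
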